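-- pv_equiv track=rewrite | github.com/christianlouis/dmarq | backend/app/services/dns_resolver.py | extract_dmarc_policy
-- ===== SOURCE A (Python) =====
-- from typing import List, Optional, Tuple
--
-- def extract_dmarc_policy(dmarc_record: Optional[str]) -> Optional[str]:
--     """Parse the *p=* tag from a DMARC TXT record string.
--
--     Returns the policy value (e.g. ``"none"``, ``"quarantine"``,
--     ``"reject"``) or ``None`` if the record is absent or unparsable.
--     """
--     if not dmarc_record:
--         return None
--     for part in dmarc_record.split(";"):
--         part = part.strip()
--         if part.lower().startswith("p="):
--             return part[2:].strip().lower()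
--     return None
-- ===== SOURCE B (Python) =====
-- from typing import Optional
--
-- def extract_dmarc_policy(dmarc_record: Optional[str]) -> Optional[str]:
--     """Parse the whole record into a first-occurrence-wins tag table, then look up 'p'."""
--     if not dmarc_record:
--         return None
--     tags = {}
--     for part in dmarc_record.split(";"):
--         part = part.strip()
--         key, sep, value = part.partition("=")
--         if sep and key.lower() not in tags:
--             tags[key.lower()] = value.strip().lower()
--     return tags.get("p")
-- ===== Notes on version B (the rewrite author's own statement) =====
-- stated objective: idiomatic
-- what changed: B replaces A's early-return scan for the policy tag with parsing the whole record once into a first-occurrence-wins tag-to-value table (via str.partition) and then a single table lookup.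
import Mathlib
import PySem

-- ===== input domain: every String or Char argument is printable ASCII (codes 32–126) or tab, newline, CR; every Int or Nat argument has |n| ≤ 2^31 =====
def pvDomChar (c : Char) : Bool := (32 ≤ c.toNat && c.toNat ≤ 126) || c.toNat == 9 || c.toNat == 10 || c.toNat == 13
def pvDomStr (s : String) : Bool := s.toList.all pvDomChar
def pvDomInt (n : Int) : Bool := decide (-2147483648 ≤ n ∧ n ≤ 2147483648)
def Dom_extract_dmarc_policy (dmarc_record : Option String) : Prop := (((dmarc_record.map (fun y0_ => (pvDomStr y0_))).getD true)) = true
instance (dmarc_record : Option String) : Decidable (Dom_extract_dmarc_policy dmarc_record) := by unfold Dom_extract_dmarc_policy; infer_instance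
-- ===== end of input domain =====

-- B parses the whole record into a first-occurrence-wins tag table and looks up "p";
-- objective: idiomatic (build-table-then-lookup instead of an early-return scan), same cost.

-- ===== PORT A =====
-- the for-loop of A: scan the parts, return at the first one whose stripped, lowered form starts with "p="
def pvScanA : List (List Char) → Option (List Char)
  | [] => none
  | p :: rest =>
    let part := PySem.Chars.strip p
    if PySem.Chars.startswith (PySem.Chars.lower part) ['p', '='] then
      some (PySem.Chars.lower (PySem.Chars.strip (PySem.List.slice part (some 2) none)))
    else pvScanA rest

def extract_dmarc_policy (dmarc_record : Option String) : Option String :=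
  match dmarc_record with
  | none => none                   -- `if not dmarc_record` (None case)
  | some s =>
    if s = "" then none            -- `if not dmarc_record` (empty-string case)
    else (pvScanA (PySem.Chars.splitOn s.toList [';'])).map String.ofList

-- ===== PORT B =====
-- the for-loop of B: build the tag table; `part.partition("=")` = (take i, "=", drop (i+1)) at i = part.find("=")
def pvBuildTags : List (List Char) → PySem.Dict (List Char) (List Char) → PySem.Dict (List Char) (List Char)
  | [], tags => tags
  | p :: rest, tags =>
    -- part := p.strip(); i := index of the first '='; key := part[:i].lower()
    if PySem.Chars.find (PySem.Chars.strip p) ['='] = -1 then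
      pvBuildTags rest tags    -- empty sep from partition: no '=' in part
    else if tags.contains (PySem.Chars.lower (PySem.List.slice (PySem.Chars.strip p) none
        (some (PySem.Chars.find (PySem.Chars.strip p) ['='])))) then
      pvBuildTags rest tags
    else
      pvBuildTags rest (tags.insert
        (PySem.Chars.lower (PySem.List.slice (PySem.Chars.strip p) none
          (some (PySem.Chars.find (PySem.Chars.strip p) ['=']))))
        (PySem.Chars.lower (PySem.Chars.strip (PySem.List.slice (PySem.Chars.strip p)
          (some (PySem.Chars.find (PySem.Chars.strip p) ['='] + 1)) none))))

def extract_dmarc_policy_alt (dmarc_record : Option String) : Option String :=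
  match dmarc_record with
  | none => none
  | some s =>
    if s = "" then none
    else ((pvBuildTags (PySem.Chars.splitOn s.toList [';']) PySem.Dict.empty).get? ['p']).map String.ofList

-- ===== PRECONDITION & SPEC =====
def Spec_extract_dmarc_policy (dmarc_record : Option String) (out : Option String) : Prop := out = extract_dmarc_policy_alt dmarc_record
instance (dmarc_record : Option String) (out : Option String) : Decidable (Spec_extract_dmarc_policy dmarc_record out) := by unfold Spec_extract_dmarc_policy; infer_instance

-- ===== CLAIM (what is proved, stated in full; the proofs are below) =====
def Claim_equal_extract_dmarc_policy : Prop := ∀ (dmarc_record : Option String), Dom_extract_dmarc_policy dmarc_record → Spec_extract_dmarc_policy dmarc_record (extract_dmarc_policy dmarc_record)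

-- ===== LEMMAS AND PROOFS =====

theorem pvChar_toNat_inj {c d : Char} (h : c.toNat = d.toNat) : c = d := by
  rw [← Char.ofNat_toNat c, h, Char.ofNat_toNat]

theorem pvLowerChar_p (c : Char) : PySem.Chars.lowerChar c = 'p' ↔ c = 'p' ∨ c = 'P' := by
  constructor
  · intro he
    unfold PySem.Chars.lowerChar PySem.Chars.isupper at he
    split_ifs at he with h
    · simp only [Bool.and_eq_true, decide_eq_true_eq] at h
      obtain ⟨h1, h2⟩ := h
      rw [Char.le_def, UInt32.le_iff_toNat_le] at h1 h2
      have hZ : ('Z'.val.toNat) = 90 := by decide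
      have hv : (c.toNat + 32).isValidChar := Or.inl (by
        have : c.toNat ≤ 90 := by rw [← hZ]; exact h2
        omega)
      have ht := congrArg Char.toNat he
      rw [Char.toNat_ofNat, if_pos hv] at ht
      have hp : ('p'.toNat) = 112 := by decide
      right
      apply pvChar_toNat_inj
      have hP : ('P'.toNat) = 80 := by decide
      omega
    · exact Or.inl he
  · rintro (rfl | rfl) <;> decide

theorem pvLowerChar_eq (c : Char) : PySem.Chars.lowerChar c = '=' ↔ c = '=' := by
  constructor
  · intro he
    unfold PySem.Chars.lowerChar PySem.Chars.isupper at he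
    split_ifs at he with h
    · simp only [Bool.and_eq_true, decide_eq_true_eq] at h
      obtain ⟨h1, h2⟩ := h
      rw [Char.le_def, UInt32.le_iff_toNat_le] at h1 h2
      have hA : ('A'.val.toNat) = 65 := by decide
      have hZ : ('Z'.val.toNat) = 90 := by decide
      have hv : (c.toNat + 32).isValidChar := Or.inl (by
        have : c.toNat ≤ 90 := by rw [← hZ]; exact h2
        omega)
      have ht := congrArg Char.toNat he
      rw [Char.toNat_ofNat, if_pos hv] at ht
      have heq : ('='.toNat) = 61 := by decide
      have h65 : 65 ≤ c.toNat := by rw [← hA]; exact h1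
      omega
    · exact he
  · rintro rfl; decide

-- structure of a part that A matches: a 'p' or 'P', then '=', then the value
theorem pvStruct (part : List Char) :
    PySem.Chars.startswith (PySem.Chars.lower part) ['p', '='] = true ↔
    ∃ c rest, part = c :: '=' :: rest ∧ (c = 'p' ∨ c = 'P') := by
  rw [PySem.Chars.startswith_iff]
  constructor
  · intro h
    match part with
    | [] => simp [PySem.Chars.lower] at h
    | [c] => simp [PySem.Chars.lower, List.prefix_cons_iff] at h
    | c0 :: c1 :: rest =>
      simp only [PySem.Chars.lower, List.map_cons, List.cons_prefix_cons, List.nil_prefix,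
        and_true] at h
      obtain ⟨h0, h1⟩ := h
      exact ⟨c0, rest, by rw [(pvLowerChar_eq c1).mp h1.symm], (pvLowerChar_p c0).mp h0.symm⟩
  · rintro ⟨c, rest, rfl, hc⟩
    simp only [PySem.Chars.lower, List.map_cons, List.cons_prefix_cons, List.nil_prefix, and_true]
    exact ⟨((pvLowerChar_p c).mpr hc).symm, ((pvLowerChar_eq '=').mpr rfl).symm⟩

theorem pvFindEq (c : Char) (rest : List Char) (hc : c ≠ '=') :
    PySem.Chars.find (c :: '=' :: rest) ['='] = 1 := by
  have h0 : 0 ≤ PySem.Chars.find (c :: '=' :: rest) ['='] := by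
    rw [PySem.Chars.find_nonneg_iff]
    exact ⟨[c], rest, rfl⟩
  obtain ⟨hpre, hmin⟩ := PySem.Chars.find_spec h0
  set f := PySem.Chars.find (c :: '=' :: rest) ['='] with hf
  have hne0 : f.toNat ≠ 0 := by
    intro hz
    rw [hz] at hpre
    simp only [List.drop_zero, List.cons_prefix_cons] at hpre
    exact hc hpre.1.symm
  have hle1 : f.toNat ≤ 1 := by
    by_contra hgt
    exact hmin 1 (by omega) (by simp)
  omega

-- the B-side key test succeeds exactly on the parts A matches, and then i = 1
theorem pvKeyChar (part : List Char)
    (hne : PySem.Chars.find part ['='] ≠ -1)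
    (hk : PySem.Chars.lower (PySem.List.slice part none (some (PySem.Chars.find part ['=']))) = ['p']) :
    PySem.Chars.startswith (PySem.Chars.lower part) ['p', '='] = true ∧
    PySem.Chars.find part ['='] = 1 := by
  have h0 : 0 ≤ PySem.Chars.find part ['='] := by
    have := PySem.Chars.neg_one_le_find part ['=']
    omega
  obtain ⟨hpre, hmin⟩ := PySem.Chars.find_spec h0
  set f := PySem.Chars.find part ['='] with hf
  rw [PySem.List.slice_to part h0] at hk
  -- the lowered key is ['p'], so take f.toNat part is a single char c with lowerChar c = 'p'
  unfold PySem.Chars.lower at hk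
  rw [List.map_eq_cons_iff] at hk
  obtain ⟨c, tl, htake, hc, htl⟩ := hk
  rw [List.map_eq_nil_iff] at htl
  subst htl
  -- drop f.toNat part starts with '=', so f.toNat < part.length
  have hlt : f.toNat < part.length := by
    by_contra hge
    rw [List.drop_eq_nil_of_le (by omega)] at hpre
    simp at hpre
  have hlen := congrArg List.length htake
  simp only [List.length_take, List.length_cons, List.length_nil] at hlen
  have hfn : f.toNat = 1 := by omega
  rw [hfn] at htake hpre
  match part, htake with
  | c :: rest', htake =>
    simp only [List.take_succ_cons, List.take_zero, List.cons.injEq, and_true] at htake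
    subst htake
    simp only [List.drop_succ_cons, List.drop_zero] at hpre
    obtain ⟨rest, hrest⟩ := hpre
    constructor
    · rw [pvStruct]
      exact ⟨c, rest, by simp [← hrest], (pvLowerChar_p c).mp hc⟩
    · omega

theorem pvBuild_stable (parts : List (List Char)) (tags : PySem.Dict (List Char) (List Char))
    (h : (tags.get? ['p']).isSome) :
    (pvBuildTags parts tags).get? ['p'] = tags.get? ['p'] := by
  induction parts generalizing tags with
  | nil => rfl
  | cons p rest ih =>
    unfold pvBuildTags
    split
    · exact ih tags h
    · split
      · exact ih tags h
      · next hne hcont =>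
        set key := PySem.Chars.lower (PySem.List.slice (PySem.Chars.strip p) none
          (some (PySem.Chars.find (PySem.Chars.strip p) ['=']))) with hkdef
        have hkey : (['p'] : List Char) ≠ key := by
          intro hk
          rw [PySem.Dict.contains_eq_isSome_get?, ← hk, h] at hcont
          simp at hcont
        rw [ih _ (by rw [PySem.Dict.get?_insert_of_ne _ _ hkey]; exact h),
          PySem.Dict.get?_insert_of_ne _ _ hkey]

theorem pvBuild_scan (parts : List (List Char)) (tags : PySem.Dict (List Char) (List Char))
    (h : tags.contains ['p'] = false) :
    (pvBuildTags parts tags).get? ['p'] = pvScanA parts := by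
  induction parts generalizing tags with
  | nil =>
    unfold pvBuildTags pvScanA
    rw [PySem.Dict.contains_eq_isSome_get?] at h
    exact Option.not_isSome_iff_eq_none.mp (by simp [h])
  | cons p rest ih =>
    by_cases hm : PySem.Chars.startswith (PySem.Chars.lower (PySem.Chars.strip p)) ['p', '='] = true
    · -- A matches: B inserts key "p" here and the table lookup returns that value
      obtain ⟨c, vrest, hpart, hc⟩ := (pvStruct _).mp hm
      have hcne : c ≠ '=' := by rcases hc with rfl | rfl <;> decide
      have hfind : PySem.Chars.find (PySem.Chars.strip p) ['='] = 1 := by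
        rw [hpart]; exact pvFindEq c vrest hcne
      have hkey : PySem.Chars.lower (PySem.List.slice (PySem.Chars.strip p) none
          (some (PySem.Chars.find (PySem.Chars.strip p) ['=']))) = ['p'] := by
        rw [hfind, PySem.List.slice_to _ (by omega), hpart]
        simp only [Int.toNat_one, List.take_succ_cons, List.take_zero]
        unfold PySem.Chars.lower
        simp only [List.map_cons, List.map_nil]
        rw [(pvLowerChar_p c).mpr hc]
      unfold pvBuildTags pvScanA
      simp only [hm, if_true]
      rw [if_neg (by rw [hfind]; omega), hkey, if_neg (by rw [h]; simp)]
      rw [pvBuild_stable _ _ (by rw [PySem.Dict.get?_insert_self]; rfl),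
        PySem.Dict.get?_insert_self, hfind]
      norm_num
    · -- A does not match: whatever B does to the table leaves the "p" entry absent
      unfold pvBuildTags pvScanA
      simp only [hm]
      split
      · exact ih tags h
      · next hne =>
        have hkey : PySem.Chars.lower (PySem.List.slice (PySem.Chars.strip p) none
            (some (PySem.Chars.find (PySem.Chars.strip p) ['=']))) ≠ ['p'] := by
          intro hk
          exact hm (pvKeyChar _ hne hk).1
        split
        · exact ih tags h
        · rw [ih _ (by
            rw [PySem.Dict.contains_insert]
            simp only [Bool.or_eq_false_iff, beq_eq_false_iff_ne]
            exact ⟨Ne.symm hkey, h⟩)]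
          simp

-- ===== VERDICT (by name: the statement is the Claim_ definition above) =====
theorem extract_dmarc_policy_spec : Claim_equal_extract_dmarc_policy := by
  intro r _
  unfold Spec_extract_dmarc_policy extract_dmarc_policy extract_dmarc_policy_alt
  match r with
  | none => rfl
  | some s =>
    by_cases hs : s = ""
    · simp [hs]
    · simp only [hs, if_false]
      rw [pvBuild_scan _ _ (by rw [PySem.Dict.contains_eq_isSome_get?, PySem.Dict.get?_empty]; rfl)]
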